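-- pv_equiv track=rewrite | github.com/AbdullahFarooq123/FYP-Chess-Python | ChessEngine/src/Helpers/BeautifyHelpers/StringBeautifyHelpers.py | __remove_comma_noise
-- ===== SOURCE A (Python) =====
-- def __remove_comma_noise(string: str):
--     comma_index = -1
--     index_to_remove = []
--     for index, val in enumerate(string):
--         if val == ',':
--             comma_index = index
--         elif val in ']' and comma_index != -1:
--             index_to_remove.append(comma_index - len(index_to_remove))
--             comma_index = -1
--     if comma_index != -1:
--         index_to_remove.append(comma_index - len(index_to_remove))
--     for index in index_to_remove:
--         string = string[:index] + string[index + 1:]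
--     return string
-- ===== SOURCE B (Python) =====
-- def __remove_comma_noise(string: str):
--     # single forward pass: buffer the chars after the last unconsumed comma;
--     # drop that comma when a ']' (or end of string) arrives
--     out = []
--     pending = None  # chars seen after the last unconsumed ',', or None
--     for ch in string:
--         if ch == ',':
--             if pending is not None:
--                 out.append(',')
--                 out.extend(pending)
--             pending = []
--         elif ch == ']':
--             if pending is not None:
--                 out.extend(pending)
--                 pending = None
--             out.append(']')
--         else:
--             if pending is not None:
--                 pending.append(ch)
--             else:
--                 out.append(ch)
--     if pending is not None:
--         out.extend(pending)
--     return ''.join(out)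
-- ===== Notes on version B (the rewrite author's own statement) =====
-- stated objective: simpler
-- what changed: Replaces A's two-pass scheme (collect adjusted comma indices, then repeatedly rebuild the string by slicing) with a single forward pass that buffers the text after the last unconsumed comma and drops that comma when a closing bracket or the end of the string arrives.
import Mathlib
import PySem

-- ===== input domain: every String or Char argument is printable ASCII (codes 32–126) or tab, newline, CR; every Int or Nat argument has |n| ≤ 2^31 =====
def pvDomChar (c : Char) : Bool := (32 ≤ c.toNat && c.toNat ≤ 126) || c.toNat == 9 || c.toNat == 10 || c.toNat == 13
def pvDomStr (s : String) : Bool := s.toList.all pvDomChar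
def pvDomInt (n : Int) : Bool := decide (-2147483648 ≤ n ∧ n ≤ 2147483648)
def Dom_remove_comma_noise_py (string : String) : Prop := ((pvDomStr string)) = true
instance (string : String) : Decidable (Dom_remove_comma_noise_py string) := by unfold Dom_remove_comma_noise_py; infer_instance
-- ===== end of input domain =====

-- B replaces A's two-pass index-collect-then-slice scheme with one buffered forward pass (simpler, single pass).

-- ===== PORT A =====
-- Transliteration of A over the string's char list; `val in ']'` is `val = ']'` for a
-- single character; string slicing `string[:i] + string[i+1:]` is PySem.List.slice on the list.
def remove_comma_noise_py (string : String) : String :=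
  let cs := string.toList
  let st := (PySem.List.enumerate cs 0).foldl
    (fun (st : Int × List Int) p =>
      if p.2 = ',' then (p.1, st.2)
      else if p.2 = ']' ∧ st.1 ≠ -1 then (-1, st.2 ++ [st.1 - st.2.length])
      else st) (-1, [])
  let itr := if st.1 ≠ -1 then st.2 ++ [st.1 - (st.2.length : Int)] else st.2
  let final := itr.foldl
    (fun s idx => PySem.List.slice s none (some idx) ++ PySem.List.slice s (some (idx + 1)) none) cs
  String.mk final

-- ===== PORT B =====
-- Transliteration of Source B: one pass; `pending` buffers the chars after the last unconsumed comma.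
def remove_comma_noise_py_alt (string : String) : String :=
  let fin := string.toList.foldl
    (fun (st : List Char × Option (List Char)) ch =>
      if ch = ',' then
        match st.2 with
        | some buf => (st.1 ++ [','] ++ buf, some [])
        | none => (st.1, some [])
      else if ch = ']' then
        match st.2 with
        | some buf => (st.1 ++ buf ++ [']'], none)
        | none => (st.1 ++ [']'], none)
      else
        match st.2 with
        | some buf => (st.1, some (buf ++ [ch]))
        | none => (st.1 ++ [ch], none)) ([], none)
  String.mk (match fin.2 with | some buf => fin.1 ++ buf | none => fin.1)

-- ===== PRECONDITION & SPEC =====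
def Spec_remove_comma_noise_py (string : String) (out : String) : Prop := out = remove_comma_noise_py_alt string
instance (string : String) (out : String) : Decidable (Spec_remove_comma_noise_py string out) := by unfold Spec_remove_comma_noise_py; infer_instance

-- ===== CLAIM (what is proved, stated in full; the proofs are below) =====
def Claim_equal_remove_comma_noise_py : Prop := ∀ (string : String), Dom_remove_comma_noise_py string → Spec_remove_comma_noise_py string (remove_comma_noise_py string)

-- ===== LEMMAS AND PROOFS =====

-- common reference function: the string with, for each ']', the last comma before it
-- (since the previous consumption) removed, and the final unconsumed comma removed
def pvRef : List Char → Option (List Char) → List Char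
  | [], none => []
  | [], some buf => buf
  | c :: t, none =>
      if c = ',' then pvRef t (some [])
      else c :: pvRef t none
  | c :: t, some buf =>
      if c = ',' then ',' :: (buf ++ pvRef t (some []))
      else if c = ']' then buf ++ ']' :: pvRef t none
      else pvRef t (some (buf ++ [c]))

-- A's phase-1 result (after the post-loop append), written structurally
def pvMarkA : List Char → Int → Int → Nat → List Int
  | [], _, ci, k => if ci ≠ -1 then [ci - (k : Int)] else []
  | c :: t, i, ci, k =>
      if c = ',' then pvMarkA t (i + 1) i k
      else if c = ']' ∧ ci ≠ -1 then (ci - (k : Int)) :: pvMarkA t (i + 1) (-1) (k + 1)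
      else pvMarkA t (i + 1) ci k

theorem pvLoop1 (t : List Char) : ∀ (i ci : Int) (itr : List Int),
    (let st := (PySem.List.enumerate t i).foldl
      (fun (st : Int × List Int) p =>
        if p.2 = ',' then (p.1, st.2)
        else if p.2 = ']' ∧ st.1 ≠ -1 then (-1, st.2 ++ [st.1 - st.2.length])
        else st) (ci, itr)
     if st.1 ≠ -1 then st.2 ++ [st.1 - (st.2.length : Int)] else st.2)
    = itr ++ pvMarkA t i ci itr.length := by
  induction t with
  | nil => intro i ci itr; simp [pvMarkA, PySem.List.enumerate]; split <;> simp
  | cons c t ih =>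
    intro i ci itr
    rw [PySem.List.enumerate_cons]
    by_cases hc : c = ','
    · simp only [List.foldl_cons, hc, if_pos rfl, pvMarkA]
      simpa using ih (i + 1) i itr
    · by_cases hb : c = ']' ∧ ci ≠ -1
      · simp only [List.foldl_cons, pvMarkA, if_neg hc, if_pos hb]
        have := ih (i + 1) (-1) (itr ++ [ci - (itr.length : Int)])
        simp only [List.length_append, List.length_cons, List.length_nil] at this
        simp only [this, List.append_assoc, List.cons_append, List.nil_append]
      · simp only [List.foldl_cons, pvMarkA, if_neg hc, if_neg hb]
        exact ih (i + 1) ci itr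

-- one slicing removal at a natural index |r| deletes exactly that character
theorem pvEraseAt (r t : List Char) (c : Char) :
    PySem.List.slice (r ++ c :: t) none (some (r.length : Int))
      ++ PySem.List.slice (r ++ c :: t) (some ((r.length : Int) + 1)) none = r ++ t := by
  have h1 := PySem.List.slice_to_natCast (r ++ c :: t) r.length
  have h2 : ((r.length : Int) + 1) = ((r.length + 1 : Nat) : Int) := by push_cast; ring
  rw [h1, h2, PySem.List.slice_from_natCast]
  simp [List.take_append, List.drop_append]

-- main invariant: phase-2 removal at pvMarkA's indices = pvRef, for both pending states
theorem pvMain : ∀ (n : Nat) (t : List Char), t.length ≤ n →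
    (∀ (r : List Char) (k : Nat) (i : Int), i = (r.length : Int) + (k : Int) →
      (pvMarkA t i (-1) k).foldl
        (fun s idx => PySem.List.slice s none (some idx) ++ PySem.List.slice s (some (idx + 1)) none)
        (r ++ t) = r ++ pvRef t none)
    ∧ (∀ (r buf : List Char) (k : Nat) (ci i : Int),
        ci = (r.length : Int) + (k : Int) → i = ci + 1 + (buf.length : Int) →
      (pvMarkA t i ci k).foldl
        (fun s idx => PySem.List.slice s none (some idx) ++ PySem.List.slice s (some (idx + 1)) none)
        (r ++ ',' :: (buf ++ t)) = r ++ pvRef t (some buf)) := by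
  intro n
  induction n with
  | zero =>
    intro t ht
    have ht0 : t = [] := List.eq_nil_of_length_eq_zero (Nat.le_zero.mp ht)
    subst ht0
    constructor
    · intro r k i hi; simp [pvMarkA, pvRef]
    · intro r buf k ci i hci hi
      have hne : ci ≠ -1 := by omega
      simp only [pvMarkA, if_pos hne, List.foldl_cons, List.foldl_nil, pvRef]
      have : ci - (k : Int) = (r.length : Int) := by omega
      rw [this, pvEraseAt]; simp
  | succ n ih =>
    intro t ht
    match t with
    | [] => exact (ih [] (by simp))
    | c :: t =>
      have htn : t.length ≤ n := by simpa using Nat.succ_le_succ_iff.mp ht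
      constructor
      · intro r k i hi
        by_cases hc : c = ','
        · subst hc
          simp only [pvMarkA, if_pos rfl, pvRef, if_pos rfl]
          have := (ih t htn).2 r [] k i (i + 1) (by omega) (by simp)
          simpa using this
        · have hb : ¬(c = ']' ∧ (-1 : Int) ≠ -1) := by simp
          simp only [pvMarkA, if_neg hc, if_neg hb, pvRef, if_neg hc]
          have := (ih t htn).1 (r ++ [c]) k (i + 1) (by simp; omega)
          simpa [List.append_assoc] using this
      · intro r buf k ci i hci hi
        have hne : ci ≠ -1 := by omega
        by_cases hc : c = ','
        · subst hc
          simp only [pvMarkA, if_pos rfl, pvRef, if_pos rfl]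
          have := (ih t htn).2 (r ++ ',' :: buf) [] k i (i + 1)
            (by simp; omega) (by simp)
          simpa [List.append_assoc] using this
        · by_cases hcr : c = ']'
          · subst hcr
            have hck : ci - (k : Int) = (r.length : Int) := by omega
            have h1 := (ih t htn).1 (r ++ buf ++ [']']) (k + 1) (i + 1) (by simp; omega)
            simp only [pvMarkA, pvRef, if_neg hc, hne, ne_eq, not_false_eq_true, and_self,
              if_true, ite_true, reduceIte, List.foldl_cons, hck, pvEraseAt]
            simpa [List.append_assoc] using h1
          · have hb : ¬(c = ']' ∧ ci ≠ -1) := by simp [hcr]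
            simp only [pvMarkA, if_neg hc, if_neg hb, pvRef, if_neg hc, if_neg hcr]
            have := (ih t htn).2 r (buf ++ [c]) k ci (i + 1) hci (by simp; omega)
            simpa [List.append_assoc] using this

-- B's fold equals pvRef
theorem pvAltLoop (t : List Char) : ∀ (acc : List Char) (p : Option (List Char)),
    (let fin := t.foldl
      (fun (st : List Char × Option (List Char)) ch =>
        if ch = ',' then
          match st.2 with
          | some buf => (st.1 ++ [','] ++ buf, some [])
          | none => (st.1, some [])
        else if ch = ']' then
          match st.2 with
          | some buf => (st.1 ++ buf ++ [']'], none)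
          | none => (st.1 ++ [']'], none)
        else
          match st.2 with
          | some buf => (st.1, some (buf ++ [ch]))
          | none => (st.1 ++ [ch], none)) (acc, p)
     match fin.2 with | some buf => fin.1 ++ buf | none => fin.1)
    = acc ++ pvRef t p := by
  induction t with
  | nil => intro acc p; cases p <;> simp [pvRef]
  | cons c t ih =>
    intro acc p
    by_cases hc : c = ','
    · subst hc
      cases p with
      | none => simp only [List.foldl_cons, if_pos rfl, pvRef]; exact ih acc (some [])
      | some buf =>
        simp only [List.foldl_cons, if_pos rfl, pvRef, if_pos rfl]
        have := ih (acc ++ [','] ++ buf) (some [])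
        simpa [List.append_assoc] using this
    · by_cases hcr : c = ']'
      · subst hcr
        cases p with
        | none =>
          simp only [List.foldl_cons, if_neg hc, if_pos rfl, pvRef, if_neg hc]
          have := ih (acc ++ [']']) none
          simpa [List.append_assoc] using this
        | some buf =>
          simp only [List.foldl_cons, if_neg hc, if_pos rfl, pvRef, if_neg hc, if_pos rfl]
          have := ih (acc ++ buf ++ [']']) none
          simpa [List.append_assoc] using this
      · cases p with
        | none =>
          simp only [List.foldl_cons, if_neg hc, if_neg hcr, pvRef, if_neg hc]
          have := ih (acc ++ [c]) none
          simpa [List.append_assoc] using this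
        | some buf =>
          simp only [List.foldl_cons, if_neg hc, if_neg hcr, pvRef, if_neg hc, if_neg hcr]
          exact ih acc (some (buf ++ [c]))

-- ===== VERDICT (by name: the statement is the Claim_ definition above) =====
theorem remove_comma_noise_py_spec : Claim_equal_remove_comma_noise_py := by
  intro s _
  unfold Spec_remove_comma_noise_py remove_comma_noise_py remove_comma_noise_py_alt
  simp only []
  have hA := pvLoop1 s.toList 0 (-1) []
  simp only [List.nil_append, List.length_nil] at hA
  have hmain := (pvMain s.toList.length s.toList le_rfl).1 [] 0 0 (by simp)
  simp only [List.nil_append] at hmain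
  have hB := pvAltLoop s.toList [] none
  simp only [List.nil_append] at hB
  simp only [hA, hmain, hB]
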